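-- pv_equiv track=rewrite | github.com/isaacyoung/jwcoding | model/columnutils.py | get_java_set_method_name
-- ===== SOURCE A (Python) =====
-- def get_java_set_method_name(column):
--     temp = column.lower()
--     if temp.find('_') != -1:
--         temp = temp.split('_')
--         result = []
--         for s in temp:
--             result.append(s.capitalize())
--
--         return 'set' + ''.join(result)
--     else:
--         return temp
-- ===== SOURCE B (Python) =====
-- def get_java_set_method_name(column):
--     temp = column.lower()
--     if '_' not in temp:
--         return temp
--     result = 'set'
--     cap = True
--     for c in temp:
--         if c == '_':
--             cap = True
--         elif cap:
--             result += c.capitalize()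
--             cap = False
--         else:
--             result += c
--     return result
-- ===== Notes on version B (the rewrite author's own statement) =====
-- stated objective: alternative
-- what changed: Replaces splitting on underscores, per-token capitalize and join with a single left-to-right state-machine scan over the characters carrying a boolean flag that marks token starts.
import Mathlib
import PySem

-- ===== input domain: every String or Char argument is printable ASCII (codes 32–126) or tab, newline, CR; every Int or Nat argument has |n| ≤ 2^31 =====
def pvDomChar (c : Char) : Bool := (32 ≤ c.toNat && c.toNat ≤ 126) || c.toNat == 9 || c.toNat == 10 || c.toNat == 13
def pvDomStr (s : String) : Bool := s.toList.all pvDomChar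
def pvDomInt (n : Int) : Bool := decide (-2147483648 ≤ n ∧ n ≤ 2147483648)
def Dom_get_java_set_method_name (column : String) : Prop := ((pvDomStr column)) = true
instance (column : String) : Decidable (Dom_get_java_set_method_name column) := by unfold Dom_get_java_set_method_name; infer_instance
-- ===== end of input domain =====

set_option maxRecDepth 4000


-- B replaces A's split-on-underscore + per-token capitalize + join by a single state-machine
-- scan over the characters (objective: alternative decomposition, same cost).

-- ===== PORT A =====
-- hand port of Python str.capitalize (first char upper-cased, rest lower-cased); exact on ASCII
def pyCapitalize (cs : List Char) : List Char :=
  match cs with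
  | [] => []
  | c :: rest => PySem.Chars.upperChar c :: PySem.Chars.lower rest

def get_java_set_method_name (column : String) : String :=
  let temp := PySem.Str.lower column
  if PySem.Str.find temp "_" ≠ -1 then
    let parts := PySem.Chars.splitOn temp.toList "_".toList
    let result := parts.foldl (fun acc s => acc ++ [pyCapitalize s]) []
    String.ofList ("set".toList ++ PySem.Chars.join [] result)
  else
    temp

-- ===== PORT B =====
-- B's loop: one pass; the boolean is true when the next letter starts a token.
-- (`c.capitalize()` on a single char is ported as upperChar; exact on ASCII)
def altScan : List Char → Bool → List Char → List Char
  | [], _, acc => acc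
  | c :: rest, cap, acc =>
    if c = '_' then altScan rest true acc
    else if cap then altScan rest false (acc ++ [PySem.Chars.upperChar c])
    else altScan rest false (acc ++ [c])

def get_java_set_method_name_alt (column : String) : String :=
  let temp := PySem.Str.lower column
  if PySem.Str.isIn "_" temp then
    String.ofList (altScan temp.toList true "set".toList)
  else
    temp

-- ===== PRECONDITION & SPEC =====
def Spec_get_java_set_method_name (column : String) (out : String) : Prop := out = get_java_set_method_name_alt column
instance (column : String) (out : String) : Decidable (Spec_get_java_set_method_name column out) := by unfold Spec_get_java_set_method_name; infer_instance

-- ===== CLAIM (what is proved, stated in full; the proofs are below) =====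
def Claim_equal_get_java_set_method_name : Prop := ∀ (column : String), Dom_get_java_set_method_name column → Spec_get_java_set_method_name column (get_java_set_method_name column)

-- ===== LEMMAS AND PROOFS =====

-- A clean structural model of splitOn on separator "_"
def mySplit : List Char → List Char → List (List Char)
  | [], cur => [cur.reverse]
  | c :: rest, cur => if c = '_' then cur.reverse :: mySplit rest [] else mySplit rest (c :: cur)

theorem splitOn_go_eq (l : List Char) : ∀ (f : Nat) (cur : List Char) (acc : List (List Char)),
    l.length < f → PySem.Chars.splitOn.go ['_'] f l cur acc = acc.reverse ++ mySplit l cur := by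
  induction l with
  | nil =>
    intro f cur acc hf
    match f, hf with
    | f + 1, _ => rw [PySem.Chars.splitOn.go.eq_def]; simp [mySplit]
  | cons c rest ih =>
    intro f cur acc hf
    match f, hf with
    | f + 1, hf =>
      rw [PySem.Chars.splitOn.go.eq_def]
      simp only [List.isPrefixOf, Bool.and_true]
      by_cases hc : c = '_'
      · subst hc
        simp only [beq_self_eq_true, if_pos, List.length_singleton, List.drop_one, List.tail_cons]
        rw [ih f [] (cur.reverse :: acc) (by simpa using Nat.lt_of_succ_lt_succ hf)]
        conv_rhs => rw [mySplit]
        simp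
      · have : ('_' == c) = false := beq_eq_false_iff_ne.mpr (Ne.symm hc)
        simp only [this, if_neg Bool.false_ne_true]
        rw [ih f (c :: cur) acc (Nat.lt_of_succ_lt_succ hf)]
        simp [mySplit, hc]

theorem splitOn_eq (l : List Char) : PySem.Chars.splitOn l ['_'] = mySplit l [] := by
  unfold PySem.Chars.splitOn
  rw [splitOn_go_eq l (l.length + 1) [] [] (Nat.lt_succ_self _)]
  simp

theorem mySplit_struct (l : List Char) : ∀ cur : List Char,
    mySplit l cur = (cur.reverse ++ (mySplit l []).headI) :: (mySplit l []).tail := by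
  induction l with
  | nil => intro cur; simp [mySplit]
  | cons c rest ih =>
    intro cur
    by_cases hc : c = '_'
    · subst hc; simp [mySplit]
    · simp only [mySplit, if_neg hc]
      rw [ih (c :: cur), ih [c]]
      simp

theorem mem_mySplit (l : List Char) : ∀ (cur part : List Char) (x : Char),
    part ∈ mySplit l cur → x ∈ part → x ∈ cur ∨ x ∈ l := by
  induction l with
  | nil =>
    intro cur part x hp hx
    simp [mySplit] at hp
    subst hp; left; simpa using hx
  | cons c rest ih =>
    intro cur part x hp hx
    by_cases hc : c = '_'
    · subst hc
      simp [mySplit] at hp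
      rcases hp with hp | hp
      · subst hp; left; simpa using hx
      · rcases ih [] part x hp hx with h | h
        · simp at h
        · right; simp [h]
    · simp only [mySplit, if_neg hc] at hp
      rcases ih (c :: cur) part x hp hx with h | h
      · simp at h
        rcases h with h | h
        · right; simp [h]
        · left; exact h
      · right; simp [h]

theorem join_nil_eq_flatten (ps : List (List Char)) : PySem.Chars.join [] ps = ps.flatten := by
  simp only [PySem.Chars.join, List.intercalate]
  induction ps with
  | nil => rfl
  | cons h t ih => cases t <;> simp_all [List.intersperse]

theorem foldl_push {α β : Type} (f : α → β) : ∀ (l : List α) (acc : List β),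
    l.foldl (fun a s => a ++ [f s]) acc = acc ++ l.map f := by
  intro l
  induction l with
  | nil => simp
  | cons h t ih => intro acc; simp [ih]

theorem lowerChar_idem (c : Char) : PySem.Chars.lowerChar (PySem.Chars.lowerChar c) = PySem.Chars.lowerChar c := by
  simp only [PySem.Chars.lowerChar, PySem.Chars.isupper]
  split_ifs with h1 h2 <;> try rfl
  exfalso
  simp [Char.le_def, UInt32.le_iff_toNat_le] at h1 h2
  obtain ⟨a, b⟩ := h1
  have e : c.toNat = c.val.toNat := rfl
  have hv : (c.toNat + 32).isValidChar := by left; omega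
  have ht : (Char.ofNat (c.toNat + 32)).toNat = c.toNat + 32 := by
    rw [Char.toNat_ofNat]; simp [hv]
  have e2 : (Char.ofNat (c.toNat + 32)).toNat = (Char.ofNat (c.toNat + 32)).val.toNat := rfl
  omega

-- the scan, against the split-and-capitalize picture (ts must be lower-fixed)
theorem altScan_spec (ts : List Char) (hl : ∀ c ∈ ts, PySem.Chars.lowerChar c = c) :
    (∀ acc, altScan ts true acc = acc ++ ((mySplit ts []).map pyCapitalize).flatten) ∧
    (∀ acc, altScan ts false acc =
      acc ++ (mySplit ts []).headI ++ ((mySplit ts []).tail.map pyCapitalize).flatten) := by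
  induction ts with
  | nil => constructor <;> intro acc <;> simp [altScan, mySplit, pyCapitalize]
  | cons c rest ih =>
    have hrest : ∀ x ∈ rest, PySem.Chars.lowerChar x = x := fun x hx => hl x (List.mem_cons_of_mem _ hx)
    obtain ⟨iht, ihf⟩ := ih hrest
    by_cases hc : c = '_'
    · subst hc
      constructor <;> intro acc <;> simp [altScan, mySplit, pyCapitalize, iht]
    · have hstruct : mySplit (c :: rest) [] =
          (c :: (mySplit rest []).headI) :: (mySplit rest []).tail := by
        simp only [mySplit, if_neg hc]
        rw [mySplit_struct rest [c]]
        simp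
      have hhead : PySem.Chars.lower ((mySplit rest []).headI) = (mySplit rest []).headI := by
        unfold PySem.Chars.lower
        rcases hsp : mySplit rest [] with _ | ⟨h, t⟩
        · rfl
        · simp only [List.headI]
          have hmem : ∀ x ∈ h, PySem.Chars.lowerChar x = x := by
            intro x hx
            rcases mem_mySplit rest [] h x (by simp [hsp]) hx with h' | h'
            · simp at h'
            · exact hrest x h'
          rw [List.map_congr_left hmem]; simp
      constructor <;> intro acc
      · simp only [altScan, if_neg hc]
        rw [ihf, hstruct]
        simp [pyCapitalize, hhead]
      · simp only [altScan, if_neg hc, if_neg Bool.false_ne_true]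
        rw [ihf, hstruct]
        simp

-- ===== VERDICT (by name: the statement is the Claim_ definition above) =====
theorem get_java_set_method_name_spec : Claim_equal_get_java_set_method_name := by
  intro column _
  unfold Spec_get_java_set_method_name
  unfold get_java_set_method_name get_java_set_method_name_alt
  simp only []
  have hiff : (PySem.Str.find (PySem.Str.lower column) "_" ≠ -1) ↔
      (PySem.Str.isIn "_" (PySem.Str.lower column) = true) := by
    rw [PySem.Str.find_ne_neg_one_iff, PySem.Str.isIn_iff_infix]
  by_cases h : PySem.Str.isIn "_" (PySem.Str.lower column) = true
  · rw [if_pos (hiff.mpr h), if_pos h]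
    have hts : (PySem.Str.lower column).toList = PySem.Chars.lower column.toList := by
      simp [PySem.Str.lower]
    have hl : ∀ c ∈ (PySem.Str.lower column).toList, PySem.Chars.lowerChar c = c := by
      rw [hts]
      intro c hc
      simp only [PySem.Chars.lower, List.mem_map] at hc
      obtain ⟨d, _, hd⟩ := hc
      rw [← hd]; exact lowerChar_idem d
    obtain ⟨hT, _⟩ := altScan_spec (PySem.Str.lower column).toList hl
    rw [hT "set".toList]
    rw [foldl_push, join_nil_eq_flatten]
    have : ("_" : String).toList = ['_'] := rfl
    rw [this, splitOn_eq]
    simp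
  · rw [if_neg (fun hne => h (hiff.mp hne)), if_neg h]
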